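-- pv_equiv track=rewrite | github.com/Jameshuff91/open-cure | scripts/h369_multicategory_ensemble.py | get_target_scores
-- ===== SOURCE A (Python) =====
-- def get_target_scores(disease_info, drug_target_sets):
--     """Get target overlap scores for all drugs."""
--     disease_genes = disease_info['genes']
--     scores = {}
--     for drug, targets in drug_target_sets.items():
--         overlap = len(targets & disease_genes)
--         if overlap > 0:
--             scores[drug] = overlap
--     return scores
-- ===== SOURCE B (Python) =====
-- def get_target_scores(disease_info, drug_target_sets):
--     """Get target overlap scores for all drugs (inverted gene->drugs index)."""
--     disease_genes = disease_info['genes']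
--     index = {}
--     for drug, targets in drug_target_sets.items():
--         for gene in targets:
--             index.setdefault(gene, []).append(drug)
--     counts = {}
--     for gene in disease_genes:
--         for drug in index.get(gene, []):
--             counts[drug] = counts.get(drug, 0) + 1
--     return {drug: counts[drug] for drug in drug_target_sets if drug in counts}
-- ===== Notes on version B (the rewrite author's own statement) =====
-- stated objective: alternative
-- what changed: Replaces the per-drug set-intersection loop by an inverted gene->drugs index built once, then counts hits per drug by walking the disease genes' posting lists; a final pass re-emits scores in drug order.
import Mathlib
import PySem

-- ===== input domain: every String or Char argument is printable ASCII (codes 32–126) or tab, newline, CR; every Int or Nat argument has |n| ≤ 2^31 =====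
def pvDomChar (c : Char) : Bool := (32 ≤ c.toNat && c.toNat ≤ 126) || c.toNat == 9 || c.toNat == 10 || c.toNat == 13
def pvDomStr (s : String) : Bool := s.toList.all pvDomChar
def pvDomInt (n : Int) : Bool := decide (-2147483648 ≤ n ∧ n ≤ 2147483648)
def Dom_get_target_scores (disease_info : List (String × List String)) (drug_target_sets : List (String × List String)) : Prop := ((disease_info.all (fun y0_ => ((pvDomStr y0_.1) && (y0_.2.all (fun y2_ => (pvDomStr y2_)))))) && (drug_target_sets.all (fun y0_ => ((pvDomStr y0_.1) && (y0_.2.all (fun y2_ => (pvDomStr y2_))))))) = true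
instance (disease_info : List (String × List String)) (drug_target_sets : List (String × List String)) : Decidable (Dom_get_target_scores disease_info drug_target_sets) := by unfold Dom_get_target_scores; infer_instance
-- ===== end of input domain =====

-- B replaces A's per-drug set intersection by an inverted gene -> drugs index walked once per disease gene (alternative decomposition, same results).

-- ===== PORT A =====
-- A: for each drug, overlap = len(targets & disease_genes); keep drugs with overlap > 0.
def get_target_scores (disease_info : List (String × List String)) (drug_target_sets : List (String × List String)) : List (String × Int) :=
  let disease_genes : PySem.Set String :=
    PySem.Set.ofList (((PySem.Dict.ofList disease_info).get? "genes").getD [])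
  (((PySem.Dict.ofList drug_target_sets).items).foldl
    (fun (scores : PySem.Dict String Int) p =>
      let overlap : Int := PySem.Set.len (PySem.Set.inter (PySem.Set.ofList p.2) disease_genes)
      if overlap > 0 then scores.insert p.1 overlap else scores)
    PySem.Dict.empty).items

-- ===== PORT B =====
-- B: build gene -> [drugs] index, count hits per drug over the disease genes, re-emit in drug order.
def get_target_scores_alt (disease_info : List (String × List String)) (drug_target_sets : List (String × List String)) : List (String × Int) :=
  let disease_genes : PySem.Set String :=
    PySem.Set.ofList (((PySem.Dict.ofList disease_info).get? "genes").getD [])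
  let items := (PySem.Dict.ofList drug_target_sets).items
  let index : PySem.Dict String (List String) :=
    items.foldl (fun ix p =>
      (PySem.Set.ofList p.2).foldl (fun ix g => ix.modify g [] (· ++ [p.1])) ix)
      PySem.Dict.empty
  let counts : PySem.Dict String Int :=
    disease_genes.foldl (fun c g =>
      (index.getD g []).foldl (fun c d => c.insert d (c.getD d 0 + 1)) c)
      PySem.Dict.empty
  (items.foldl (fun (out : PySem.Dict String Int) p =>
      if counts.contains p.1 then out.insert p.1 (counts.getD p.1 0) else out)
    PySem.Dict.empty).items

-- ===== PRECONDITION & SPEC =====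
-- Pre_ excludes exactly the inputs where A raises KeyError: disease_info without a 'genes' key (B raises there too).
def Pre_get_target_scores (disease_info : List (String × List String)) (drug_target_sets : List (String × List String)) : Prop :=
  "genes" ∈ disease_info.map Prod.fst
instance (disease_info : List (String × List String)) (drug_target_sets : List (String × List String)) : Decidable (Pre_get_target_scores disease_info drug_target_sets) := by unfold Pre_get_target_scores; infer_instance
def pvWitness_get_target_scores : (List (String × List String)) × (List (String × List String)) :=
  ([("genes", ["g1", "g2"])], [("d1", ["g1", "g3"]), ("d2", ["g4"])])
def Spec_get_target_scores (disease_info : List (String × List String)) (drug_target_sets : List (String × List String)) (out : List (String × Int)) : Prop := out = get_target_scores_alt disease_info drug_target_sets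
instance (disease_info : List (String × List String)) (drug_target_sets : List (String × List String)) (out : List (String × Int)) : Decidable (Spec_get_target_scores disease_info drug_target_sets out) := by unfold Spec_get_target_scores; infer_instance

-- ===== CLAIM (what is proved, stated in full; the proofs are below) =====
def Claim_equal_get_target_scores : Prop := ∀ (disease_info : List (String × List String)) (drug_target_sets : List (String × List String)), Dom_get_target_scores disease_info drug_target_sets → Pre_get_target_scores disease_info drug_target_sets → Spec_get_target_scores disease_info drug_target_sets (get_target_scores disease_info drug_target_sets)

-- ===== LEMMAS AND PROOFS =====

-- Appending one drug under every gene of a duplicate-free list of genes.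
lemma postings_step (gs : List String) (hgs : gs.Nodup) (d : String)
    (ix : PySem.Dict String (List String)) (g : String) :
    (gs.foldl (fun ix g' => PySem.Dict.modify ix g' [] (· ++ [d])) ix).getD g []
      = ix.getD g [] ++ (if g ∈ gs then [d] else []) := by
  induction gs generalizing ix with
  | nil => simp
  | cons a gs ih =>
    rcases List.nodup_cons.mp hgs with ⟨ha, hgs'⟩
    rw [List.foldl_cons, ih hgs']
    by_cases hga : g = a
    · subst hga
      simp [ha]
    · by_cases hmem : g ∈ gs <;> simp [PySem.Dict.getD_modify, hmem, hga]

-- The inverted index: the posting list of a gene g is the drugs whose target set contains g, in order.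
lemma index_getD (L : List (String × List String)) (ix : PySem.Dict String (List String)) (g : String) :
    (L.foldl (fun ix p => (PySem.Set.ofList p.2).foldl
        (fun ix g' => ix.modify g' [] (· ++ [p.1])) ix) ix).getD g []
      = ix.getD g [] ++ (L.filter (fun p => decide (g ∈ p.2))).map Prod.fst := by
  induction L generalizing ix with
  | nil => simp
  | cons p L ih =>
    rw [List.foldl_cons, ih, postings_step _ (PySem.Set.nodup_ofList _)]
    by_cases hmem : g ∈ p.2 <;> simp [hmem, PySem.Set.mem_ofList]

-- The nested counting loop is Counter of the concatenated posting lists.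
lemma counts_eq_counter (gs : List String) (ix : PySem.Dict String (List String)) :
    gs.foldl (fun c g => (ix.getD g []).foldl
        (fun c d => c.insert d (c.getD d 0 + 1)) c) PySem.Dict.empty
      = PySem.Dict.counter (gs.flatMap (fun g => ix.getD g [])) := by
  rw [← PySem.Dict.foldl_insert_getD_add_one_eq_counter, List.foldl_flatMap]

-- In a list with duplicate-free keys, a key of a member occurs in a filtered key list iff the member passes.
lemma count_filter_map (L : List (String × List String)) (c : String × List String → Bool)
    (p : String × List String) (hp : p ∈ L) (hnd : (L.map Prod.fst).Nodup) :
    ((L.filter c).map Prod.fst).count p.1 = (if c p then 1 else 0) := by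
  induction L with
  | nil => cases hp
  | cons q L ih =>
    rcases List.nodup_cons.mp hnd with ⟨hq, hnd'⟩
    rcases List.mem_cons.mp hp with rfl | hpL
    · have h0 : ((L.filter c).map Prod.fst).count p.1 = 0 := by
        refine List.count_eq_zero.mpr ?_
        intro hmem
        exact hq (by
          rcases List.mem_map.mp hmem with ⟨r, hr, hr1⟩
          exact hr1 ▸ List.mem_map_of_mem (List.mem_of_mem_filter hr))
      by_cases hc : c p <;> simp [hc, h0]
    · have hne : q.1 ≠ p.1 := by
        intro h
        exact hq (h ▸ List.mem_map_of_mem hpL)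
      by_cases hc : c q <;> simp [hc, hne, ih hpL hnd']

-- Intersection cardinality is symmetric for duplicate-free lists.
lemma filter_mem_length_comm (s t : List String) (hs : s.Nodup) (ht : t.Nodup) :
    (s.filter (fun x => decide (x ∈ t))).length = (t.filter (fun x => decide (x ∈ s))).length := by
  refine List.Perm.length_eq ?_
  refine (List.perm_ext_iff_of_nodup (hs.filter _) (ht.filter _)).mpr ?_
  intro a
  simp [List.mem_filter, and_comm]

-- A comprehension over distinct keys: the dict fold with a guard is the filtered key-value list.
lemma items_fold_filter (L : List (String × List String)) (hnd : (L.map Prod.fst).Nodup)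
    (c : String × List String → Prop) [DecidablePred c] (f : String × List String → Int) :
    ((L.foldl (fun d p => if c p then d.insert p.1 (f p) else d) PySem.Dict.empty).items)
      = (L.filter (fun p => decide (c p))).map (fun p => (p.1, f p)) := by
  rw [PySem.List.foldl_ite_eq_foldl_filter c]
  have h2 : ((L.filter (fun p => decide (c p))).map Prod.fst).Nodup :=
    (List.Sublist.map Prod.fst List.filter_sublist).nodup hnd
  simpa using PySem.Dict.items_foldl_insert_fresh (L.filter (fun p => decide (c p)))
      Prod.fst f PySem.Dict.empty (by intro a _; rfl) h2

-- A 0/1 sum over a list is the length of the filtered list.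
lemma sum_ite_one_zero (G : List String) (c : String → Bool) :
    (G.map (fun g => if c g then (1 : Nat) else 0)).sum = (G.filter c).length := by
  induction G with
  | nil => simp
  | cons a G ih => by_cases h : c a <;> simp [h, ih, Nat.add_comm]

-- Core equivalence over an arbitrary duplicate-free gene set and drug list with distinct keys.
lemma core (G : List String) (hG : G.Nodup)
    (L : List (String × List String)) (hnd : (L.map Prod.fst).Nodup) :
    (L.foldl (fun (scores : PySem.Dict String Int) p =>
        if PySem.Set.len (PySem.Set.inter (PySem.Set.ofList p.2) G) > 0
        then scores.insert p.1 (PySem.Set.len (PySem.Set.inter (PySem.Set.ofList p.2) G))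
        else scores) PySem.Dict.empty).items
      = (let index : PySem.Dict String (List String) :=
          L.foldl (fun ix p =>
            (PySem.Set.ofList p.2).foldl (fun ix g => ix.modify g [] (· ++ [p.1])) ix)
            PySem.Dict.empty
         let counts : PySem.Dict String Int :=
          G.foldl (fun c g =>
            (index.getD g []).foldl (fun c d => c.insert d (c.getD d 0 + 1)) c)
            PySem.Dict.empty
         (L.foldl (fun (out : PySem.Dict String Int) p =>
            if counts.contains p.1 then out.insert p.1 (counts.getD p.1 0) else out)
          PySem.Dict.empty).items) := by
  simp only []
  set idx : PySem.Dict String (List String) :=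
    L.foldl (fun ix p =>
      (PySem.Set.ofList p.2).foldl (fun ix g => ix.modify g [] (· ++ [p.1])) ix)
      PySem.Dict.empty with hidx
  set C : PySem.Dict String Int :=
    G.foldl (fun c g =>
      (idx.getD g []).foldl (fun c d => c.insert d (c.getD d 0 + 1)) c)
      PySem.Dict.empty with hCdef
  set flat : List String := G.flatMap (fun g => idx.getD g []) with hflat
  have hCc : C = PySem.Dict.counter flat := counts_eq_counter G idx
  have hpost : ∀ g, idx.getD g [] = (L.filter (fun p => decide (g ∈ p.2))).map Prod.fst := by
    intro g
    rw [hidx]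
    simpa using index_getD L PySem.Dict.empty g
  have hcount : ∀ p ∈ L, flat.count p.1 = (G.filter (fun g => decide (g ∈ p.2))).length := by
    intro p hp
    rw [hflat, List.count_flatMap]
    have hmc : ∀ g ∈ G, (List.count p.1 ∘ fun g => idx.getD g []) g
        = (fun g => if (fun g => decide (g ∈ p.2)) g then (1 : Nat) else 0) g := by
      intro g _
      simp only [Function.comp_apply, hpost g]
      exact count_filter_map L (fun q => decide (g ∈ q.2)) p hp hnd
    rw [List.map_congr_left hmc, sum_ite_one_zero]
  have hlen : ∀ p ∈ L,
      PySem.Set.len (PySem.Set.inter (PySem.Set.ofList p.2) G) = (flat.count p.1 : Int) := by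
    intro p hp
    rw [hcount p hp]
    unfold PySem.Set.len PySem.Set.inter
    congr 1
    have e1 : (PySem.Set.ofList p.2).filter (fun x => PySem.Set.contains G x)
        = (PySem.Set.ofList p.2).filter (fun x => decide (x ∈ G)) := by
      apply List.filter_congr
      intro x _
      simp [PySem.Set.contains]
    have e2 : G.filter (fun g => decide (g ∈ p.2))
        = G.filter (fun g => decide (g ∈ PySem.Set.ofList p.2)) := by
      apply List.filter_congr
      intro g _
      simp [PySem.Set.mem_ofList]
    rw [e1, e2, filter_mem_length_comm _ _ (PySem.Set.nodup_ofList p.2) hG]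
  have hval : ∀ p ∈ L, C.getD p.1 0 = PySem.Set.len (PySem.Set.inter (PySem.Set.ofList p.2) G) := by
    intro p hp
    rw [hCc, PySem.Dict.getD_counter, hlen p hp]
  have hcond : ∀ p ∈ L, decide (C.contains p.1 = true)
      = decide (PySem.Set.len (PySem.Set.inter (PySem.Set.ofList p.2) G) > 0) := by
    intro p hp
    have h1 : C.contains p.1 = flat.contains p.1 := by rw [hCc, PySem.Dict.contains_counter]
    apply decide_eq_decide.mpr
    rw [h1, hlen p hp]
    constructor
    · intro h
      have : p.1 ∈ flat := by simpa using h
      exact_mod_cast List.count_pos_iff.mpr this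
    · intro h
      have : 0 < flat.count p.1 := by exact_mod_cast h
      simpa using List.count_pos_iff.mp this
  rw [items_fold_filter L hnd (fun p => PySem.Set.len (PySem.Set.inter (PySem.Set.ofList p.2) G) > 0)
        (fun p => PySem.Set.len (PySem.Set.inter (PySem.Set.ofList p.2) G)),
      items_fold_filter L hnd (fun p => C.contains p.1 = true) (fun p => C.getD p.1 0),
      List.filter_congr hcond]
  apply List.map_congr_left
  intro p hp
  have hpL : p ∈ L := List.mem_of_mem_filter hp
  rw [hval p hpL]

-- ===== VERDICT (by name: the statement is the Claim_ definition above) =====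
theorem get_target_scores_spec : Claim_equal_get_target_scores := by
  intro disease_info drug_target_sets _ _
  unfold Spec_get_target_scores get_target_scores get_target_scores_alt
  exact core _ (PySem.Set.nodup_ofList _) _ (PySem.Dict.nodup_keys_ofList drug_target_sets)
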